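-- pv_equiv track=rewrite | github.com/dntaylor/DevTools | Plotter/python/higgsUtilities.py | getChannels
-- ===== SOURCE A (Python) =====
-- from itertools import product, combinations_with_replacement
--
-- def getChannels(analysis):
--     '''Get channel strings for analysis'''
--     chans = {}
--     hppChannels = [''.join(x) for x in product('emt',repeat=2)]
--     hmChannels  = [''.join(x) for x in product('emt',repeat=1)]
--     if analysis=='Hpp4l':
--         for hpp in hppChannels:
--             for hmm in hppChannels:
--                 chanString = ''.join(sorted(hpp))+''.join(sorted(hmm))
--                 if chanString not in chans:
--                     chans[chanString] = []
--                 chans[chanString] += [hpp+hmm]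
--     elif analysis=='Hpp3l':
--         for hpp in hppChannels:
--             for hm in hmChannels:
--                 chanString = ''.join(sorted(hpp))+''.join(sorted(hm))
--                 if chanString not in chans:
--                     chans[chanString] = []
--                 chans[chanString] += [hpp+hm]
--     return chans
-- ===== SOURCE B (Python) =====
-- from itertools import product, groupby
--
-- def getChannels(analysis):
--     '''Get channel strings for analysis'''
--     hppChannels = [''.join(x) for x in product('emt', repeat=2)]
--     hmChannels = [''.join(x) for x in product('emt', repeat=1)]
--     if analysis == 'Hpp4l':
--         pairs = [(''.join(sorted(h1)) + ''.join(sorted(h2)), h1 + h2)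
--                  for h1 in hppChannels for h2 in hppChannels]
--     elif analysis == 'Hpp3l':
--         pairs = [(''.join(sorted(h1)) + ''.join(sorted(h2)), h1 + h2)
--                  for h1 in hppChannels for h2 in hmChannels]
--     else:
--         return {}
--     pairs.sort(key=lambda p: p[0])
--     return {k: [c for _, c in g] for k, g in groupby(pairs, key=lambda p: p[0])}
-- ===== Notes on version B (the rewrite author's own statement) =====
-- stated objective: alternative
-- what changed: Replaces A's dict accumulation inside the nested loops by building a flat list of (chanString, combo) pairs in loop order, stably sorting it by chanString and grouping consecutive equal keys (itertools.groupby).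
import Mathlib
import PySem

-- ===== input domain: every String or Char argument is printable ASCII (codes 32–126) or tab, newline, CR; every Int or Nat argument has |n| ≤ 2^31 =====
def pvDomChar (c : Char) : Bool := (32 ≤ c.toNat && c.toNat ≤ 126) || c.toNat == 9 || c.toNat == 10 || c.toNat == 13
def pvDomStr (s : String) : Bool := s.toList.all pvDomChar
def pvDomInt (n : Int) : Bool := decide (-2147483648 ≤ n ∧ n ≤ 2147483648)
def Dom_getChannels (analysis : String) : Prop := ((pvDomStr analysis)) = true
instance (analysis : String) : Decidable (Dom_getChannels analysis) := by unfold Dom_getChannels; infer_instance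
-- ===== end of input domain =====

-- B replaces A's dict accumulation inside nested loops by a flat list of (key, combo)
-- pairs, stably sorted by key and grouped (sort-then-groupby); objective: alternative.

-- ===== PORT A =====
-- [''.join(x) for x in product('emt', repeat=2)] / repeat=1
def pvHppChannels : List String :=
  (['e','m','t'].flatMap fun a => ['e','m','t'].map fun b => String.ofList [a, b])
def pvHmChannels : List String :=
  (['e','m','t'].map fun a => String.ofList [a])
-- ''.join(sorted(s))
def pvSortStr (s : String) : String :=
  String.ofList (PySem.List.sorted s.toList (fun c => c) false)
-- one body of A's inner loop: chanString key; append combo under that key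
def pvStep (d : PySem.Dict String (List String)) (x y : String) :
    PySem.Dict String (List String) :=
  let chanString := String.ofList ((pvSortStr x).toList ++ (pvSortStr y).toList)
  let d := if d.contains chanString then d else d.insert chanString []
  d.insert chanString (d.getD chanString [] ++ [String.ofList (x.toList ++ y.toList)])

def getChannels (analysis : String) : List (String × List String) :=
  let chans : PySem.Dict String (List String) := PySem.Dict.empty
  let chans :=
    if analysis == "Hpp4l" then
      pvHppChannels.foldl (fun d hpp => pvHppChannels.foldl (fun d hmm => pvStep d hpp hmm) d) chans
    else if analysis == "Hpp3l" then
      pvHppChannels.foldl (fun d hpp => pvHmChannels.foldl (fun d hm => pvStep d hpp hm) d) chans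
    else chans
  chans.items

-- ===== PORT B =====
-- one (chanString, combo) pair
def pvPair (x y : String) : String × String :=
  (String.ofList ((pvSortStr x).toList ++ (pvSortStr y).toList), String.ofList (x.toList ++ y.toList))
-- itertools.groupby over the sorted pair list, folded from the right
def pvGroup (ps : List (String × String)) : List (String × List String) :=
  ps.foldr
    (fun p acc =>
      match acc with
      | (k', vs) :: t => if p.1 == k' then (k', p.2 :: vs) :: t else (p.1, [p.2]) :: (k', vs) :: t
      | [] => [(p.1, [p.2])])
    []

def getChannels_alt (analysis : String) : List (String × List String) :=
  if analysis == "Hpp4l" then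
    pvGroup (PySem.List.sorted
      (pvHppChannels.flatMap fun h1 => pvHppChannels.map fun h2 => pvPair h1 h2)
      (fun p => p.1.toList) false)
  else if analysis == "Hpp3l" then
    pvGroup (PySem.List.sorted
      (pvHppChannels.flatMap fun h1 => pvHmChannels.map fun h2 => pvPair h1 h2)
      (fun p => p.1.toList) false)
  else []

-- ===== PRECONDITION & SPEC =====
def Spec_getChannels (analysis : String) (out : List (String × List String)) : Prop := out = getChannels_alt analysis
instance (analysis : String) (out : List (String × List String)) : Decidable (Spec_getChannels analysis out) := by unfold Spec_getChannels; infer_instance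

-- ===== CLAIM (what is proved, stated in full; the proofs are below) =====
def Claim_equal_getChannels : Prop := ∀ (analysis : String), Dom_getChannels analysis → Spec_getChannels analysis (getChannels analysis)

-- ===== LEMMAS AND PROOFS =====
set_option maxRecDepth 100000 in
set_option maxHeartbeats 4000000 in
theorem pv_eq_hpp4l : getChannels "Hpp4l" = getChannels_alt "Hpp4l" := by decide

set_option maxRecDepth 100000 in
set_option maxHeartbeats 4000000 in
theorem pv_eq_hpp3l : getChannels "Hpp3l" = getChannels_alt "Hpp3l" := by decide

theorem pv_eq_other (analysis : String) (h1 : analysis ≠ "Hpp4l") (h2 : analysis ≠ "Hpp3l") :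
    getChannels analysis = getChannels_alt analysis := by
  simp [getChannels, getChannels_alt, h1, h2]
  rfl

-- ===== VERDICT (by name: the statement is the Claim_ definition above) =====
theorem getChannels_spec : Claim_equal_getChannels := by
  intro analysis _
  unfold Spec_getChannels
  by_cases h1 : analysis = "Hpp4l"
  · subst h1; exact pv_eq_hpp4l
  · by_cases h2 : analysis = "Hpp3l"
    · subst h2; exact pv_eq_hpp3l
    · exact pv_eq_other analysis h1 h2
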